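-- pv_equiv track=rewrite | github.com/sukhanovaxenia/LAMPforge | lamp_designer.py | process_bisulfite
-- ===== SOURCE A (Python) =====
-- def process_bisulfite(sequence: str) -> str:
--     """Convert sequence for bisulfite sequencing (C -> T, except CpG)"""
--     sequence = sequence.upper()
--     processed = list(sequence)
--
--     for i, base in enumerate(sequence):
--         if base == 'C':
--             # Check if it's part of CpG
--             if i < len(sequence) - 1 and sequence[i + 1] == 'G':
--                 continue  # Keep CpG methylation sites
--             else:
--                 processed[i] = 'T'  # Convert non-CpG cytosines
--
--     return ''.join(processed)
-- ===== SOURCE B (Python) =====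
-- def process_bisulfite(sequence: str) -> str:
--     """Convert sequence for bisulfite sequencing (C -> T, except CpG)"""
--     return 'CG'.join(part.replace('C', 'T')
--                      for part in sequence.upper().split('CG'))
-- ===== Notes on version B (the rewrite author's own statement) =====
-- stated objective: faster
-- what changed: Replaces A's Python-level indexed loop with per-position lookahead and in-place list mutation by a staged library pipeline: split the uppercased sequence on the separator 'CG', convert every C to T inside each CG-free segment with str.replace, and rejoin the segments with 'CG'.
import Mathlib
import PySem

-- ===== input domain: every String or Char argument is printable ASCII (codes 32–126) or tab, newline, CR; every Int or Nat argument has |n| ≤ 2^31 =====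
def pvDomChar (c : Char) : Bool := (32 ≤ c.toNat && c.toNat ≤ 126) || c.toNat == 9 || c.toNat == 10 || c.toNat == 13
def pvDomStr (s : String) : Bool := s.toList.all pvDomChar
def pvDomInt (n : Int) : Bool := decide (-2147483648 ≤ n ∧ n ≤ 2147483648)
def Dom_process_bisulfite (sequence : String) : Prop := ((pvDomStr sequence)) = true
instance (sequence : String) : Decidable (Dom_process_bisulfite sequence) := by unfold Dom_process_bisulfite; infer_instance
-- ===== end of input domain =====

-- B replaces A's per-index loop with lookahead by a staged library pipeline — split on "CG", convert C to T in each segment, rejoin with "CG" — moving the scan into C-level string ops (measured constant-factor speedup).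

-- ===== PORT A =====
def process_bisulfite (sequence : String) : String :=
  let cs := (PySem.Str.upper sequence).toList
  let processed :=
    (PySem.List.enumerate cs).foldl
      (fun acc (p : Int × Char) =>
        if p.2 = 'C' then
          if p.1 < (cs.length : Int) - 1 ∧ PySem.List.pyGet? cs (p.1 + 1) = some 'G'
          then acc
          else PySem.List.pySetD acc p.1 'T'
        else acc)
      cs
  String.mk processed

-- ===== PORT B =====
def process_bisulfite_alt (sequence : String) : String :=
  let s := (PySem.Str.upper sequence).toList
  String.mk (PySem.Chars.join ['C','G']
    ((PySem.Chars.splitOn s ['C','G']).map (fun part => PySem.Chars.replace part ['C'] ['T'])))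

-- ===== PRECONDITION & SPEC =====
def Spec_process_bisulfite (sequence : String) (out : String) : Prop := out = process_bisulfite_alt sequence
instance (sequence : String) (out : String) : Decidable (Spec_process_bisulfite sequence out) := by unfold Spec_process_bisulfite; infer_instance

-- ===== CLAIM (what is proved, stated in full; the proofs are below) =====
def Claim_equal_process_bisulfite : Prop := ∀ (sequence : String), Dom_process_bisulfite sequence → Spec_process_bisulfite sequence (process_bisulfite sequence)

-- ===== LEMMAS AND PROOFS =====

-- reference transform: convert each 'C' whose successor is not 'G'
def pvBis : List Char → List Char
  | [] => []
  | c :: rest => (if c = 'C' ∧ rest.head? ≠ some 'G' then 'T' else c) :: pvBis rest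

-- map of B's per-segment conversion
def pvRepl (l : List Char) : List Char := l.map (fun c => if c = 'C' then 'T' else c)

-- reference splitter on the separator "CG"
def pvSplitCG : List Char → List (List Char)
  | [] => [[]]
  | [c] => [[c]]
  | c :: d :: rest =>
    if c = 'C' ∧ d = 'G' then [] :: pvSplitCG rest
    else
      match pvSplitCG (d :: rest) with
      | [] => [[c]]
      | p :: ps => (c :: p) :: ps

lemma pvSplitCG_ne_nil (l : List Char) : pvSplitCG l ≠ [] := by
  match l with
  | [] => simp [pvSplitCG]
  | [c] => simp [pvSplitCG]
  | c :: d :: rest =>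
    unfold pvSplitCG
    split_ifs
    · simp
    · cases h : pvSplitCG (d :: rest) <;> simp

lemma pvA_eq (cs : List Char) : ∀ (l : List Char) (i : Nat) (acc : List Char),
    cs.drop i = l → acc.drop i = l →
    (PySem.List.enumerate l (i : Int)).foldl
      (fun acc (p : Int × Char) =>
        if p.2 = 'C' then
          if p.1 < (cs.length : Int) - 1 ∧ PySem.List.pyGet? cs (p.1 + 1) = some 'G'
          then acc
          else PySem.List.pySetD acc p.1 'T'
        else acc) acc
    = acc.take i ++ pvBis l := by
  intro l
  induction l with
  | nil =>
    intro i acc hcs hacc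
    have hi : acc.length ≤ i := by
      have := congrArg List.length hacc
      simp at this; omega
    simp [PySem.List.enumerate, pvBis, List.take_of_length_le hi]
  | cons c rest ih =>
    intro i acc hcs hacc
    have hlen : cs.length = i + 1 + rest.length := by
      have := congrArg List.length hcs
      simp at this; omega
    have halen : acc.length = i + 1 + rest.length := by
      have := congrArg List.length hacc
      simp at this; omega
    have hia : i < acc.length := by omega
    have hcs' : cs.drop (i + 1) = rest := by
      have : cs.drop (i + 1) = (cs.drop i).drop 1 := by
        rw [List.drop_drop]
      rw [this, hcs]; rfl
    have hget : PySem.List.pyGet? cs ((i : Int) + 1) = rest.head? := by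
      have : ((i : Int) + 1) = ((i + 1 : Nat) : Int) := by push_cast; ring
      rw [this, PySem.List.pyGet?_natCast]
      rw [← hcs', ← List.head?_drop]
    have hacc' : acc.drop (i + 1) = rest := by
      have : acc.drop (i + 1) = (acc.drop i).drop 1 := by rw [List.drop_drop]
      rw [this, hacc]; rfl
    have hsetdrop : (acc.set i 'T').drop (i + 1) = rest := by
      rw [List.drop_set_of_lt (by omega : i < i + 1), hacc']
    have htake1 : (acc.set i 'T').take (i + 1) = acc.take i ++ ['T'] := by
      rw [List.take_succ]
      congr 1
      · exact List.take_set_of_le (le_refl i)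
      · simp [hia]
    have htake2 : acc.take (i + 1) = acc.take i ++ [c] := by
      rw [List.take_succ]
      congr 1
      have : acc[i]? = rest.head?.elim (some c) (fun _ => some c) := by
        rw [← List.head?_drop, hacc]; cases rest.head? <;> rfl
      cases h : rest.head? <;> simp [this, h]
    have hcond : ((i : Int) < (cs.length : Int) - 1) ↔ rest ≠ [] := by
      constructor
      · intro h hr; subst hr; simp at hlen ⊢; omega
      · intro h
        have : rest.length ≠ 0 := by simpa using h
        omega
    rw [PySem.List.enumerate_cons]
    simp only [List.foldl_cons]
    by_cases hc : c = 'C'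
    · by_cases hg : rest.head? = some 'G'
      · have hne : rest ≠ [] := by intro h; subst h; simp at hg
        have : (if c = 'C' then
            if (i : Int) < (cs.length : Int) - 1 ∧ PySem.List.pyGet? cs ((i : Int) + 1) = some 'G'
            then acc else PySem.List.pySetD acc (i : Int) 'T' else acc) = acc := by
          simp [hc, hget, hg, hcond.mpr hne]
        rw [this, show ((i:Int) + 1) = ((i+1:Nat):Int) from by push_cast; ring,
          ih (i + 1) acc hcs' hacc', htake2]
        simp [pvBis, hc, hg]
      · have : (if c = 'C' then
            if (i : Int) < (cs.length : Int) - 1 ∧ PySem.List.pyGet? cs ((i : Int) + 1) = some 'G'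
            then acc else PySem.List.pySetD acc (i : Int) 'T' else acc) = acc.set i 'T' := by
          simp [hc, hget, hg, PySem.List.pySetD_natCast]
        rw [this, show ((i:Int) + 1) = ((i+1:Nat):Int) from by push_cast; ring,
          ih (i + 1) (acc.set i 'T') hcs' hsetdrop, htake1]
        simp [pvBis, hc, hg]
    · have : (if c = 'C' then
          if (i : Int) < (cs.length : Int) - 1 ∧ PySem.List.pyGet? cs ((i : Int) + 1) = some 'G'
          then acc else PySem.List.pySetD acc (i : Int) 'T' else acc) = acc := by
        simp [hc]
      rw [this, show ((i:Int) + 1) = ((i+1:Nat):Int) from by push_cast; ring,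
          ih (i + 1) acc hcs' hacc', htake2]
      simp [pvBis, hc]

-- replace.go with old=['C'], new=['T'] is pvRepl
lemma pvReplace_go_eq : ∀ (fuel : Nat) (l acc : List Char), l.length ≤ fuel →
    PySem.Chars.replace.go ['C'] ['T'] fuel l acc = acc.reverse ++ pvRepl l := by
  intro fuel
  induction fuel with
  | zero =>
    intro l acc h
    have : l = [] := by cases l <;> simp_all
    subst this
    rw [PySem.Chars.replace.go]; simp [pvRepl]
  | succ fuel ih =>
    intro l acc h
    cases l with
    | nil =>
      rw [PySem.Chars.replace.go]
      · simp [pvRepl]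
      · omega
    | cons c t =>
      rw [PySem.Chars.replace.go]
      by_cases hc : c = 'C'
      · subst hc
        rw [if_pos (show List.isPrefixOf ['C'] ('C' :: t) = true from by simp [List.isPrefixOf])]
        rw [show List.drop (['C'] : List Char).length ('C' :: t) = t from rfl,
          ih t (['T'].reverse ++ acc) (by simpa using h)]
        simp [pvRepl]
      · rw [if_neg (show ¬ List.isPrefixOf ['C'] (c :: t) = true from by
          simp [List.isPrefixOf]; exact fun hh => hc hh.symm)]
        rw [ih t (c :: acc) (by simpa using h)]
        simp [pvRepl, hc]

lemma pvReplace_eq (l : List Char) : PySem.Chars.replace l ['C'] ['T'] = pvRepl l := by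
  rw [PySem.Chars.replace]
  rw [if_neg (by simp)]
  exact (by simpa using pvReplace_go_eq l.length l [] le_rfl)

-- the two equation shapes of pvSplitCG actually used below
lemma pvSplitCG_CG (r : List Char) : pvSplitCG ('C' :: 'G' :: r) = [] :: pvSplitCG r := by
  rw [pvSplitCG, if_pos ⟨rfl, rfl⟩]

lemma pvSplitCG_cons (c : Char) (t : List Char)
    (hp : ¬ List.isPrefixOf ['C','G'] (c :: t) = true) :
    pvSplitCG (c :: t) = match pvSplitCG t with
      | [] => [[c]]
      | p :: ps => (c :: p) :: ps := by
  cases t with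
  | nil => simp [pvSplitCG]
  | cons d rr =>
    rw [pvSplitCG, if_neg]
    intro hq
    obtain ⟨h1, h2⟩ := hq
    subst h1; subst h2
    exact hp (by simp [List.isPrefixOf])

-- splitOn.go with sep "CG" is pvSplitCG
lemma pvSplitOn_go_eq : ∀ (fuel : Nat) (l cur : List Char) (acc : List (List Char)),
    l.length ≤ fuel →
    PySem.Chars.splitOn.go ['C','G'] fuel l cur acc
      = acc.reverse ++ (pvSplitCG l).modifyHead (cur.reverse ++ ·) := by
  intro fuel
  induction fuel with
  | zero =>
    intro l cur acc h
    have : l = [] := by cases l <;> simp_all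
    subst this
    rw [PySem.Chars.splitOn.go]; simp [pvSplitCG]
  | succ fuel ih =>
    intro l cur acc h
    cases l with
    | nil =>
      rw [PySem.Chars.splitOn.go]
      · simp [pvSplitCG]
      · omega
    | cons c t =>
      rw [PySem.Chars.splitOn.go]
      by_cases hp : List.isPrefixOf ['C','G'] (c :: t) = true
      · rw [if_pos hp]
        obtain ⟨r, hr⟩ := List.isPrefixOf_iff_prefix.mp hp
        have hr' : 'C' :: 'G' :: r = c :: t := hr
        injection hr' with h1 h2
        subst h1; subst h2
        rw [show List.drop (['C','G'] : List Char).length ('C' :: 'G' :: r) = r from rfl,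
          ih r [] (cur.reverse :: acc) (by simp at h; omega)]
        rw [pvSplitCG_CG]
        cases hs : pvSplitCG r with
        | nil => exact absurd hs (pvSplitCG_ne_nil r)
        | cons p ps => simp
      · rw [if_neg hp, ih t (c :: cur) acc (by simpa using h)]
        rw [pvSplitCG_cons c t hp]
        cases hsplit : pvSplitCG t with
        | nil => exact absurd hsplit (pvSplitCG_ne_nil t)
        | cons p ps => simp

-- intercalate peels a prefix of the head segment
lemma pvInter_cons (sep x y : List Char) (ps : List (List Char)) :
    List.intercalate sep ((x ++ y) :: ps) = x ++ List.intercalate sep (y :: ps) := by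
  cases ps <;> simp [List.intercalate]

-- join of the converted segments is pvBis
lemma pvJoin_eq_aux : ∀ (n : Nat) (l : List Char), l.length ≤ n →
    PySem.Chars.join ['C','G'] ((pvSplitCG l).map pvRepl) = pvBis l := by
  intro n
  induction n with
  | zero =>
    intro l h
    have : l = [] := by cases l <;> simp_all
    subst this
    simp [pvSplitCG, pvBis, PySem.Chars.join, List.intercalate, pvRepl]
  | succ n ih =>
    intro l h
    cases l with
    | nil => simp [pvSplitCG, pvBis, PySem.Chars.join, List.intercalate, pvRepl]
    | cons c t =>
      cases t with
      | nil =>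
        simp [pvSplitCG, pvBis, PySem.Chars.join, List.intercalate, pvRepl]
      | cons d rest =>
        by_cases hcd : c = 'C' ∧ d = 'G'
        · obtain ⟨hc, hd⟩ := hcd
          subst hc; subst hd
          rw [pvSplitCG_CG]
          cases hsplit : pvSplitCG rest with
          | nil => exact absurd hsplit (pvSplitCG_ne_nil rest)
          | cons p ps =>
            have ihr := ih rest (by simp at h; omega)
            rw [hsplit] at ihr
            simp only [List.map_cons, PySem.Chars.join] at ihr ⊢
            rw [show (pvRepl [] : List Char) = [] from rfl]
            rw [show List.intercalate ['C','G'] (([] : List Char) :: pvRepl p :: ps.map pvRepl)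
                  = ['C','G'] ++ List.intercalate ['C','G'] (pvRepl p :: ps.map pvRepl) from by
                simp [List.intercalate]]
            rw [ihr]
            simp [pvBis]
        · have hp : ¬ List.isPrefixOf ['C','G'] (c :: d :: rest) = true := by
            simp [List.isPrefixOf]
            intro h1 h2
            exact absurd ⟨h1.symm, h2.symm⟩ hcd
          rw [pvSplitCG_cons c (d :: rest) hp]
          cases hsplit : pvSplitCG (d :: rest) with
          | nil => exact absurd hsplit (pvSplitCG_ne_nil (d :: rest))
          | cons p ps =>
            have ihr := ih (d :: rest) (by simp at h ⊢; omega)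
            rw [hsplit] at ihr
            simp only [List.map_cons, PySem.Chars.join] at ihr ⊢
            rw [show pvRepl (c :: p) = pvRepl [c] ++ pvRepl p from by simp [pvRepl]]
            rw [pvInter_cons ['C','G'] (pvRepl [c]) (pvRepl p) (ps.map pvRepl), ihr]
            have hbis : pvBis (c :: d :: rest)
                = (if c = 'C' then 'T' else c) :: pvBis (d :: rest) := by
              by_cases hc : c = 'C'
              · have hdg : d ≠ 'G' := fun hdg => hcd ⟨hc, hdg⟩
                simp [pvBis, hc, hdg]
              · simp [pvBis, hc]
            rw [hbis]
            by_cases hc : c = 'C' <;> simp [pvRepl, hc]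

lemma pvJoin_eq (l : List Char) :
    PySem.Chars.join ['C','G'] ((pvSplitCG l).map pvRepl) = pvBis l :=
  pvJoin_eq_aux l.length l le_rfl

-- ===== VERDICT (by name: the statement is the Claim_ definition above) =====
theorem process_bisulfite_spec : Claim_equal_process_bisulfite := by
  intro sequence _
  unfold Spec_process_bisulfite process_bisulfite process_bisulfite_alt
  dsimp only
  set cs := (PySem.Str.upper sequence).toList with hcs
  have hA := pvA_eq cs cs 0 cs rfl rfl
  simp only [List.take_zero, List.nil_append] at hA
  have hsplit : PySem.Chars.splitOn cs ['C','G'] = pvSplitCG cs := by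
    rw [PySem.Chars.splitOn, pvSplitOn_go_eq (cs.length + 1) cs [] [] (by omega)]
    cases pvSplitCG cs <;> simp
  rw [hsplit]
  have hmap : (pvSplitCG cs).map (fun part => PySem.Chars.replace part ['C'] ['T'])
      = (pvSplitCG cs).map pvRepl := by
    simp [pvReplace_eq]
  rw [hmap, pvJoin_eq]
  exact congrArg String.mk hA
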